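-- pv_equiv track=rewrite | github.com/10seashells/advent-of-code-2024 | 7/aoc-2024-7-1.py | calc
-- ===== SOURCE A (Python) =====
-- def calc(result, vals):
--     add = vals[0]+vals[1]
--     mult = vals[0]*vals[1]
--     if len(vals) == 2:
--         return add == result or mult == result
--     elif len(vals) == 3:
--         return calc(result, [mult]+[vals[2]]) or calc(result, [add]+[vals[2]])
--     else:
--         return calc(result, [mult]+vals[2:]) or calc(result, [add]+vals[2:])
-- ===== SOURCE B (Python) =====
-- def calc(result, vals):
--     reachable = {vals[0] + vals[1], vals[0] * vals[1]}
--     for v in vals[2:]: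
--         reachable = {r + v for r in reachable} | {r * v for r in reachable}
--     return result in reachable
-- ===== Notes on version B (the rewrite author's own statement) =====
-- stated objective: alternative
-- what changed: Replaces A's exponential binary recursion (one recursive call per +/* choice) with an iterative forward sweep that maintains a deduplicated set of reachable running totals and tests membership at the end.
import Mathlib
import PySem

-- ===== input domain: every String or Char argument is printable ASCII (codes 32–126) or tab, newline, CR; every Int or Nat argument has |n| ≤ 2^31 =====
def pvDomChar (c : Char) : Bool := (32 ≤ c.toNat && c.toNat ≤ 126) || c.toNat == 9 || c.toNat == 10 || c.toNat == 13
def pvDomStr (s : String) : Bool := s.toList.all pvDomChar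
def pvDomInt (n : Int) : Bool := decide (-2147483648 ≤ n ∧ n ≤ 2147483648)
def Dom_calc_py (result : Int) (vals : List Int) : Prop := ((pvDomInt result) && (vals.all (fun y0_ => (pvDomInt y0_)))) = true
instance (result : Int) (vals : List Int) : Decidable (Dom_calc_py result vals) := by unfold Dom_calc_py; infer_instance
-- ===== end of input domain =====

-- B replaces A's exponential binary recursion by an iterative forward sweep that
-- maintains a deduplicated set of reachable running totals (an alternative algorithm).

-- ===== PORT A =====
-- Literal port of A's recursion. The `a :: b :: rest` pattern corresponds to Python's
-- unconditional vals[0]/vals[1] access (IndexError on shorter lists, excluded by Pre_);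
-- the `_ => false` arm is unreachable under Pre_. For vals = a::b::rest we have
-- [mult]+[vals[2]] = [mult]+vals[2:] = mult::rest, so both recursive branches are kept
-- in A's order with A's length test.
def calc_py (result : Int) (vals : List Int) : Bool :=
  match vals with
  | a :: b :: rest =>
    let add := a + b
    let mult := a * b
    if vals.length = 2 then (add == result) || (mult == result)
    else if vals.length = 3 then calc_py result (mult :: rest) || calc_py result (add :: rest)
    else calc_py result (mult :: rest) || calc_py result (add :: rest)
  | _ => false
termination_by vals.length
decreasing_by all_goals (simp only [List.length_cons]; omega)

-- ===== PORT B =====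
-- {r+v for r in reachable} | {r*v for r in reachable}, folded over vals[2:].
def calc_py_alt (result : Int) (vals : List Int) : Bool :=
  match vals with
  | [] => false
  | [_] => false
  | a :: b :: rest =>
    let final := rest.foldl
      (fun s v => PySem.Set.union (PySem.Set.ofList (s.map (· + v)))
                                  (PySem.Set.ofList (s.map (· * v))))
      (PySem.Set.ofList [a + b, a * b])
    PySem.Set.contains final result

-- ===== PRECONDITION & SPEC =====
-- Both Pythons raise IndexError on vals of length < 2 (vals[0]+vals[1] is unconditional).
def Pre_calc_py (result : Int) (vals : List Int) : Prop := 2 ≤ vals.length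
instance (result : Int) (vals : List Int) : Decidable (Pre_calc_py result vals) := by
  unfold Pre_calc_py; infer_instance
def pvWitness_calc_py : Int × List Int := (5, [2, 3])
def Spec_calc_py (result : Int) (vals : List Int) (out : Bool) : Prop := out = calc_py_alt result vals
instance (result : Int) (vals : List Int) (out : Bool) : Decidable (Spec_calc_py result vals out) := by
  unfold Spec_calc_py; infer_instance

-- ===== CLAIM (what is proved, stated in full; the proofs are below) =====
def Claim_equal_calc_py : Prop := ∀ (result : Int) (vals : List Int), Dom_calc_py result vals → Pre_calc_py result vals → Spec_calc_py result vals (calc_py result vals)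

-- ===== LEMMAS AND PROOFS =====

-- Reference model: plain list of reachable totals, no dedup.
def reachStep (s : List Int) (v : Int) : List Int := s.map (· + v) ++ s.map (· * v)
def reachL (s : List Int) (rest : List Int) : List Int := rest.foldl reachStep s

theorem mem_reachStep_congr {s t : List Int} (h : ∀ x, x ∈ s ↔ x ∈ t) (v x : Int) :
    x ∈ reachStep s v ↔ x ∈ reachStep t v := by
  simp [reachStep, List.mem_append, List.mem_map, h]

theorem reach_congr {s t : List Int} (rest : List Int) (h : ∀ x, x ∈ s ↔ x ∈ t) (x : Int) :
    x ∈ reachL s rest ↔ x ∈ reachL t rest := by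
  induction rest generalizing s t with
  | nil => exact h x
  | cons v rest ih =>
      simpa [reachL, List.foldl_cons] using
        ih (s := reachStep s v) (t := reachStep t v) (mem_reachStep_congr h v)

theorem reach_union (s t : List Int) (rest : List Int) (x : Int) :
    x ∈ reachL (s ++ t) rest ↔ x ∈ reachL s rest ∨ x ∈ reachL t rest := by
  induction rest generalizing s t with
  | nil => simp [reachL]
  | cons v rest ih =>
      have h : ∀ y, y ∈ reachStep (s ++ t) v ↔ y ∈ (reachStep s v ++ reachStep t v) := by
        intro y; simp only [reachStep, List.mem_append, List.mem_map]; aesop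
      calc x ∈ reachL (s ++ t) (v :: rest)
          ↔ x ∈ reachL (reachStep (s ++ t) v) rest := Iff.rfl
        _ ↔ x ∈ reachL (reachStep s v ++ reachStep t v) rest := reach_congr rest h x
        _ ↔ _ := ih _ _

-- A-side characterisation: calc_py decides reachability from the pair {a+b, a*b}.
theorem calc_py_char (result : Int) (rest : List Int) :
    ∀ a b, calc_py result (a :: b :: rest) = true ↔ result ∈ reachL [a + b, a * b] rest := by
  induction rest with
  | nil =>
      intro a b
      simp [calc_py, reachL]
      constructor
      · rintro (h | h) <;> simp_all
      · rintro (h | h) <;> simp_all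
  | cons v rest ih =>
      intro a b
      have step : calc_py result (a :: b :: v :: rest) =
          (calc_py result ((a * b) :: v :: rest) || calc_py result ((a + b) :: v :: rest)) := by
        rw [calc_py]; split_ifs with hl1 hl2 <;> first | rfl | (simp at hl1)
      rw [step]
      have h1 := ih (a * b) v
      have h2 := ih (a + b) v
      have expand : ∀ x, x ∈ reachL [a + b, a * b] (v :: rest) ↔
          x ∈ reachL [a * b + v, a * b * v] rest ∨ x ∈ reachL [a + b + v, (a + b) * v] rest := by
        intro x
        have hc : ∀ y, y ∈ reachStep [a + b, a * b] v ↔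
            y ∈ (([a * b + v, a * b * v] : List Int) ++ [a + b + v, (a + b) * v]) := by
          intro y; simp [reachStep]; tauto
        calc x ∈ reachL [a + b, a * b] (v :: rest)
            ↔ x ∈ reachL (reachStep [a + b, a * b] v) rest := Iff.rfl
          _ ↔ x ∈ reachL (([a * b + v, a * b * v] : List Int) ++ [a + b + v, (a + b) * v]) rest :=
              reach_congr rest hc x
          _ ↔ _ := reach_union _ _ rest x
      simp only [Bool.or_eq_true, h1, h2, expand result]

-- B-side: the set-valued fold has the same members as the list-valued reference fold.
theorem alt_fold_char (rest : List Int) :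
    ∀ (s t : List Int), (∀ x, x ∈ s ↔ x ∈ t) →
      ∀ x, (x ∈ rest.foldl
            (fun s v => PySem.Set.union (PySem.Set.ofList (s.map (· + v)))
                                        (PySem.Set.ofList (s.map (· * v)))) s
            ↔ x ∈ reachL t rest) := by
  induction rest with
  | nil => intro s t h x; exact h x
  | cons v rest ih =>
      intro s t h x
      apply ih
      intro y
      simp only [PySem.Set.mem_union, PySem.Set.mem_ofList, List.mem_map, reachStep,
        List.mem_append]
      constructor
      · rintro (⟨r, hr, rfl⟩ | ⟨r, hr, rfl⟩)
        · exact Or.inl ⟨r, (h r).1 hr, rfl⟩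
        · exact Or.inr ⟨r, (h r).1 hr, rfl⟩
      · rintro (⟨r, hr, rfl⟩ | ⟨r, hr, rfl⟩)
        · exact Or.inl ⟨r, (h r).2 hr, rfl⟩
        · exact Or.inr ⟨r, (h r).2 hr, rfl⟩

theorem calc_py_alt_char (result a b : Int) (rest : List Int) :
    calc_py_alt result (a :: b :: rest) = true ↔ result ∈ reachL [a + b, a * b] rest := by
  simp only [calc_py_alt, PySem.Set.contains_iff]
  exact alt_fold_char rest (PySem.Set.ofList [a + b, a * b]) [a + b, a * b]
    (fun x => by simp [PySem.Set.mem_ofList]) result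

-- ===== VERDICT (by name: the statement is the Claim_ definition above) =====
theorem calc_py_spec : Claim_equal_calc_py := by
  intro result vals _ hpre
  unfold Spec_calc_py
  match vals with
  | a :: b :: rest =>
      have h1 := calc_py_char result rest a b
      have h2 := calc_py_alt_char result a b rest
      cases ha : calc_py result (a :: b :: rest) <;>
        cases hb : calc_py_alt result (a :: b :: rest) <;> simp_all
  | [] => simp [Pre_calc_py] at hpre
  | [a] => simp [Pre_calc_py] at hpre
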